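-- pv_equiv track=rewrite | github.com/muhffikkri/asa | pertemuan1/kelompok_dominan.py | manual_bisect_right
-- ===== SOURCE A (Python) =====
-- def manual_bisect_right(arr, x):
--     lo, hi = 0, len(arr)
--     while lo < hi:
--         mid = (lo + hi) // 2
--         if x < arr[mid]:
--             hi = mid
--         else:
--             lo = mid + 1
--     return lo
-- ===== SOURCE B (Python) =====
-- def manual_bisect_right(arr, x):
--     if not arr:
--         return 0
--     m = len(arr) // 2
--     if x < arr[m]:
--         return manual_bisect_right(arr[:m], x)
--     return m + 1 + manual_bisect_right(arr[m+1:], x)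
-- ===== Notes on version B (the rewrite author's own statement) =====
-- stated objective: alternative
-- what changed: Replaced the iterative two-index while loop with a recursive divide-and-conquer on the list itself: split at the middle element and recurse on the left slice or, with an offset, on the right slice.
import Mathlib
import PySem

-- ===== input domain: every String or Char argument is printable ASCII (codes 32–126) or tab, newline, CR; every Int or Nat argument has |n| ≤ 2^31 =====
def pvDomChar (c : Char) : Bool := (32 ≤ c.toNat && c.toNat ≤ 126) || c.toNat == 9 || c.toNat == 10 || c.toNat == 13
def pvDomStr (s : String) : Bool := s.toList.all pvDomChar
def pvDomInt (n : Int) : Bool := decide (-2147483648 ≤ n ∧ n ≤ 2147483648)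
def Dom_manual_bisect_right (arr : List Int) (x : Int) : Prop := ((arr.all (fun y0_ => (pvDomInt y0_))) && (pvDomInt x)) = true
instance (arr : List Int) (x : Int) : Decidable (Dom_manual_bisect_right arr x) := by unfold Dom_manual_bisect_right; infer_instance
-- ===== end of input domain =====

-- B replaces A's iterative two-index loop by a divide-and-conquer recursion on list slices
-- (objective: alternative structure, same sequence of comparisons and therefore the same value).

-- ===== PORT A =====
-- while lo < hi: mid = (lo+hi)//2; if x < arr[mid]: hi = mid else: lo = mid+1
-- lo, hi only ever hold values in 0..len(arr), so the loop state is carried as Nat indices;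
-- (lo+hi)/2 on Nat equals Python's (lo+hi)//2 on these nonnegative values.
def bisectLoopA (arr : List Int) (x : Int) (lo hi : Nat) : Nat :=
  if lo < hi then
    let mid := (lo + hi) / 2
    match PySem.List.pyGet? arr (mid : Int) with      -- arr[mid]
    | some v => if x < v then bisectLoopA arr x lo mid else bisectLoopA arr x (mid + 1) hi
    | none => lo                                      -- unreachable: mid < hi ≤ len arr
  else lo
  termination_by hi - lo
  decreasing_by all_goals omega

def manual_bisect_right (arr : List Int) (x : Int) : Int :=
  (bisectLoopA arr x 0 arr.length : Int)

-- ===== PORT B =====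
def bisectRecB (arr : List Int) (x : Int) : Nat :=
  if _h : arr.isEmpty then 0
  else
    let m := arr.length / 2
    match PySem.List.pyGet? arr (m : Int) with        -- arr[m]
    | some v =>
      if x < v then bisectRecB (PySem.List.slice arr none (some (m : Int))) x   -- arr[:m]
      else m + 1 + bisectRecB (PySem.List.slice arr (some ((m + 1 : Nat) : Int)) none) x  -- arr[m+1:]
    | none => 0                                       -- unreachable: m < len arr
  termination_by arr.length
  decreasing_by
    · simp only [PySem.List.slice_to_natCast, List.length_take]
      simp only [List.isEmpty_iff, ← List.length_pos_iff_ne_nil] at _h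
      omega
    · simp only [PySem.List.slice_from_natCast, List.length_drop]
      simp only [List.isEmpty_iff, ← List.length_pos_iff_ne_nil] at _h
      omega

def manual_bisect_right_alt (arr : List Int) (x : Int) : Int :=
  (bisectRecB arr x : Int)

-- ===== PRECONDITION & SPEC =====
def Spec_manual_bisect_right (arr : List Int) (x : Int) (out : Int) : Prop := out = manual_bisect_right_alt arr x
instance (arr : List Int) (x : Int) (out : Int) : Decidable (Spec_manual_bisect_right arr x out) := by unfold Spec_manual_bisect_right; infer_instance

-- ===== CLAIM (what is proved, stated in full; the proofs are below) =====
def Claim_equal_manual_bisect_right : Prop := ∀ (arr : List Int) (x : Int), Dom_manual_bisect_right arr x → Spec_manual_bisect_right arr x (manual_bisect_right arr x)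

-- ===== LEMMAS AND PROOFS =====

-- The loop on the index window [lo, hi) computes lo plus B's recursion on the slice arr[lo:hi].
theorem bisectLoopA_eq_rec (n : Nat) : ∀ (arr : List Int) (x : Int) (lo hi : Nat),
    lo ≤ hi → hi ≤ arr.length → hi - lo = n →
    bisectLoopA arr x lo hi = lo + bisectRecB ((arr.drop lo).take (hi - lo)) x := by
  induction n using Nat.strong_induction_on with
  | _ n ih =>
    intro arr x lo hi hle hlen hn
    rw [bisectLoopA, bisectRecB]
    have hseglen : ((arr.drop lo).take (hi - lo)).length = hi - lo := by
      simp [List.length_take, List.length_drop]; omega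
    by_cases hlt : lo < hi
    · simp only [if_pos hlt]
      have hne : ¬ ((arr.drop lo).take (hi - lo)).isEmpty = true := by
        simp [List.isEmpty_iff, ← List.length_eq_zero_iff, hseglen]; omega
      simp only [dif_neg hne, hseglen]
      set m := (hi - lo) / 2 with hm
      have hmid : (lo + hi) / 2 = lo + m := by omega
      have hmlt : lo + m < hi := by omega
      have hA : PySem.List.pyGet? arr (((lo + hi) / 2 : Nat) : Int) = arr[(lo + m)]? := by
        rw [hmid]; exact PySem.List.pyGet?_natCast arr (lo + m)
      have hB : PySem.List.pyGet? ((arr.drop lo).take (hi - lo)) ((m : Nat) : Int)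
          = arr[(lo + m)]? := by
        rw [PySem.List.pyGet?_natCast]
        rw [List.getElem?_take_of_lt (by omega), List.getElem?_drop]
      have hsome : ∃ v, arr[(lo + m)]? = some v := by
        exact ⟨arr[lo + m]'(by omega), List.getElem?_eq_getElem (by omega)⟩
      obtain ⟨v, hv⟩ := hsome
      rw [hA, hB, hv, hmid]
      by_cases hxv : x < v
      · simp only [if_pos hxv]
        have hrec := ih m (by omega) arr x lo (lo + m) (by omega) (by omega) (by omega)
        rw [hrec]
        congr 2
        rw [PySem.List.slice_to_natCast, List.take_take]
        congr 1
        omega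
      · simp only [if_neg hxv]
        have hrec := ih (hi - (lo + m + 1)) (by omega) arr x (lo + m + 1) hi (by omega) hlen rfl
        rw [hrec]
        rw [PySem.List.slice_from_natCast, List.drop_take, List.drop_drop]
        have e1 : lo + (m + 1) = lo + m + 1 := by omega
        have e2 : hi - lo - (m + 1) = hi - (lo + m + 1) := by omega
        rw [e1, e2]
        omega
    · have h0 : hi - lo = 0 := by omega
      have hlo : lo = hi := by omega
      simp only [if_neg hlt, h0, List.take_zero]
      rw [bisectRecB]
      simp

-- ===== VERDICT (by name: the statement is the Claim_ definition above) =====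
theorem manual_bisect_right_spec : Claim_equal_manual_bisect_right := by
  intro arr x _
  unfold Spec_manual_bisect_right manual_bisect_right manual_bisect_right_alt
  rw [bisectLoopA_eq_rec arr.length arr x 0 arr.length (by omega) le_rfl (by omega)]
  simp
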